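-- pv_equiv track=rewrite | github.com/lucadiliello/transformers-framework | transformers_framework/utilities/functional.py | split_dict_on_prefixes
-- ===== SOURCE A (Python) =====
-- from typing import Any, Dict, Generator, Iterable, List, Literal, Mapping, Tuple, Union
--
-- def split_dict_on_prefixes(dictionary: Dict[str, Any], prefixes: List[str], remove_prefix: bool = True):
--     r""" Split the keys and values in multiple dictionaries based on key prefixes.
--     The number of returned dictionaries if equal to len(prefixes) + 1, with the latter dict containing
--     everything that didn't match at least a prefix. Keys are compared to prefixes in the given order,
--     with a first-match policy. """
--
--     res = dict(**dictionary)
--     others = []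
--     for prefix in prefixes:
--         tmp = dict()
--         for k in list(res.keys()):
--             if k.startswith(prefix):
--                 new_k = k[len(prefix):] if remove_prefix else k
--                 tmp[new_k] = res.pop(k)
--         others.append(tmp)
--
--     return others + [res]
-- ===== SOURCE B (Python) =====
-- def split_dict_on_prefixes(dictionary, prefixes, remove_prefix=True):
--     # One pass over the items; for each key find the first matching prefix.
--     buckets = [dict() for _ in prefixes]
--     others = dict()
--     for k, v in dictionary.items():
--         for i, prefix in enumerate(prefixes):
--             if k.startswith(prefix):
--                 buckets[i][k[len(prefix):] if remove_prefix else k] = v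
--                 break
--         else:
--             others[k] = v
--     return buckets + [others]
-- ===== Notes on version B (the rewrite author's own statement) =====
-- stated objective: simpler
-- what changed: Instead of repeatedly rescanning and mutating a shrinking copy of the dict once per prefix, B pre-allocates all buckets and makes a single pass over the items, routing each key to the bucket of its first matching prefix.
import Mathlib
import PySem

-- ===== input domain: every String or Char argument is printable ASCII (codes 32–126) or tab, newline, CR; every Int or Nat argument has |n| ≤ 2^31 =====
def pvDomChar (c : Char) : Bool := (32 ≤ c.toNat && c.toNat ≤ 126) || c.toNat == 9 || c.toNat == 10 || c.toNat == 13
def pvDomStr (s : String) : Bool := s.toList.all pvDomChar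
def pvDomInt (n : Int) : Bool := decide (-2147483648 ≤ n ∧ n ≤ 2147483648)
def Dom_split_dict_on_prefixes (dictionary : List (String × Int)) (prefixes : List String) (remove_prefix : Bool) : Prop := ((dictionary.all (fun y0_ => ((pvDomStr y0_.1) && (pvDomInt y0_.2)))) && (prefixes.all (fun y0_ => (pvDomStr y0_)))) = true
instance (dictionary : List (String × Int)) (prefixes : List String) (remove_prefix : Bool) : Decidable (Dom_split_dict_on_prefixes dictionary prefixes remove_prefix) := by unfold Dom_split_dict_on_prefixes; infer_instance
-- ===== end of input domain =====

-- B replaces A's per-prefix rescan-and-pop over a shrinking dict copy by a single pass over the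
-- items that routes each key to the bucket of its first matching prefix (objective: simpler).
-- ===== PORT A =====
-- shared transliteration of the expression `k[len(prefix):] if remove_prefix else k`
def pvNewKey (remove_prefix : Bool) (prefix_ k : String) : String :=
  if remove_prefix then PySem.Str.slice k (some (PySem.Str.len prefix_)) none else k

def split_dict_on_prefixes (dictionary : List (String × Int)) (prefixes : List String) (remove_prefix : Bool) : List (List (String × Int)) :=
  let res0 : PySem.Dict String Int := PySem.Dict.ofList dictionary   -- res = dict(**dictionary)
  let st := prefixes.foldl (fun (st : List (PySem.Dict String Int) × PySem.Dict String Int) p =>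
      -- tmp = dict(); for k in list(res.keys()): if k.startswith(p): tmp[new_k] = res.pop(k)
      let inner := st.2.keys.foldl (fun (tr : PySem.Dict String Int × PySem.Dict String Int) k =>
          if PySem.Str.startswith k p then
            match tr.2.pop? k with
            | some vr => (tr.1.insert (pvNewKey remove_prefix p k) vr.1, vr.2)
            | none => tr   -- unreachable: every snapshot key is still present when reached
          else tr)
        (PySem.Dict.empty, st.2)
      (st.1 ++ [inner.1], inner.2))   -- others.append(tmp)
    ([], res0)
  (st.1 ++ [st.2]).map PySem.Dict.items   -- return others + [res]

-- ===== PORT B =====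
-- the inner `for i, prefix in enumerate(prefixes): ... break / else` loop
def pvFindPrefix : List String → String → Option (Nat × String)
  | [], _ => none
  | p :: ps, k =>
      if PySem.Str.startswith k p then some (0, p)
      else (pvFindPrefix ps k).map (fun ip => (ip.1 + 1, ip.2))

def split_dict_on_prefixes_alt (dictionary : List (String × Int)) (prefixes : List String) (remove_prefix : Bool) : List (List (String × Int)) :=
  let st := dictionary.foldl (fun (st : List (PySem.Dict String Int) × PySem.Dict String Int) kv =>
      match pvFindPrefix prefixes kv.1 with
      | some ip => (st.1.modify ip.1 (fun d => d.insert (pvNewKey remove_prefix ip.2 kv.1) kv.2), st.2)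
      | none => (st.1, st.2.insert kv.1 kv.2))
    (prefixes.map (fun _ => PySem.Dict.empty), PySem.Dict.empty)
  st.1.map PySem.Dict.items ++ [st.2.items]   -- return buckets + [others]

-- ===== PRECONDITION & SPEC =====
-- Pre_ excludes association lists with duplicate keys: a Python dict cannot contain duplicate
-- keys, so such lists do not represent any actual input of A.
def Pre_split_dict_on_prefixes (dictionary : List (String × Int)) (prefixes : List String) (remove_prefix : Bool) : Prop :=
  (dictionary.map Prod.fst).Nodup
instance (dictionary : List (String × Int)) (prefixes : List String) (remove_prefix : Bool) : Decidable (Pre_split_dict_on_prefixes dictionary prefixes remove_prefix) := by unfold Pre_split_dict_on_prefixes; infer_instance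
def pvWitness_split_dict_on_prefixes : (List (String × Int)) × List String × Bool := ([("ab", 1), ("cd", 2), ("ae", 3)], ["a", "c"], true)
def Spec_split_dict_on_prefixes (dictionary : List (String × Int)) (prefixes : List String) (remove_prefix : Bool) (out : List (List (String × Int))) : Prop := out = split_dict_on_prefixes_alt dictionary prefixes remove_prefix
instance (dictionary : List (String × Int)) (prefixes : List String) (remove_prefix : Bool) (out : List (List (String × Int))) : Decidable (Spec_split_dict_on_prefixes dictionary prefixes remove_prefix out) := by unfold Spec_split_dict_on_prefixes; infer_instance

-- ===== CLAIM (what is proved, stated in full; the proofs are below) =====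
def Claim_equal_split_dict_on_prefixes : Prop := ∀ (dictionary : List (String × Int)) (prefixes : List String) (remove_prefix : Bool), Dom_split_dict_on_prefixes dictionary prefixes remove_prefix → Pre_split_dict_on_prefixes dictionary prefixes remove_prefix → Spec_split_dict_on_prefixes dictionary prefixes remove_prefix (split_dict_on_prefixes dictionary prefixes remove_prefix)

-- ===== LEMMAS AND PROOFS =====

-- reference splitting: per-prefix peeling of the item list
def pvRef (rp : Bool) : List (String × Int) → List String → List (List (String × Int))
  | l, [] => [l]
  | l, p :: ps =>
      (l.filter (fun kv => PySem.Str.startswith kv.1 p)).map (fun kv => (pvNewKey rp p kv.1, kv.2))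
        :: pvRef rp (l.filter (fun kv => !PySem.Str.startswith kv.1 p)) ps

theorem pvNewKey_inj (rp : Bool) (p k1 k2 : String)
    (h1 : PySem.Str.startswith k1 p = true) (h2 : PySem.Str.startswith k2 p = true)
    (he : pvNewKey rp p k1 = pvNewKey rp p k2) : k1 = k2 := by
  cases rp with
  | false => simpa [pvNewKey] using he
  | true =>
    simp only [pvNewKey, if_pos] at he
    have he' := congrArg String.toList he
    simp only [PySem.Str.toList_slice, PySem.Chars.slice_eq_listSlice, PySem.Str.len,
      PySem.List.slice_from_natCast] at he'
    rw [PySem.Str.startswith_eq, PySem.Chars.startswith_iff] at h1 h2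
    obtain ⟨t1, ht1⟩ := h1
    obtain ⟨t2, ht2⟩ := h2
    have : k1.toList = k2.toList := by
      rw [← ht1, ← ht2] at he' ⊢
      simp only [List.drop_left' (by simp : (p.toList).length = p.toList.length)] at he'
      simp_all
    exact String.toList_inj.mp this

theorem pvRn_nodup (rp : Bool) (p : String) (l : List (String × Int))
    (h : (l.map Prod.fst).Nodup) :
    ((l.filter (fun kv => PySem.Str.startswith kv.1 p)).map (fun kv => pvNewKey rp p kv.1)).Nodup := by
  have hsub : List.Sublist ((l.filter (fun kv => PySem.Str.startswith kv.1 p)).map Prod.fst) (l.map Prod.fst) :=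
    List.Sublist.map _ List.filter_sublist
  have hnd : ((l.filter (fun kv => PySem.Str.startswith kv.1 p)).map Prod.fst).Nodup := hsub.nodup h
  have : (l.filter (fun kv => PySem.Str.startswith kv.1 p)).map (fun kv => pvNewKey rp p kv.1)
      = ((l.filter (fun kv => PySem.Str.startswith kv.1 p)).map Prod.fst).map (fun k => pvNewKey rp p k) := by
    simp [List.map_map]
  rw [this]
  refine List.Nodup.map_on ?_ hnd
  intro x hx y hy hxy
  have hxs : PySem.Str.startswith x p = true := by
    obtain ⟨kv, hkv, rfl⟩ := List.mem_map.mp hx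
    exact (List.mem_filter.mp hkv).2
  have hys : PySem.Str.startswith y p = true := by
    obtain ⟨kv, hkv, rfl⟩ := List.mem_map.mp hy
    exact (List.mem_filter.mp hkv).2
  exact pvNewKey_inj rp p x y hxs hys hxy

theorem pvErase_mk_middle (pre rest : List (String × Int)) (k0 : String) (v0 : Int)
    (hpre : k0 ∉ pre.map Prod.fst) (hrest : k0 ∉ rest.map Prod.fst) :
    (PySem.Dict.mk (pre ++ (k0, v0) :: rest) : PySem.Dict String Int).erase k0
      = PySem.Dict.mk (pre ++ rest) := by
  apply PySem.Dict.ext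
  show List.filter (fun q => !q.1 == k0) (pre ++ (k0, v0) :: rest) = pre ++ rest
  rw [List.filter_append, List.filter_cons]
  have hpre' : List.filter (fun q => !q.1 == k0) pre = pre := by
    rw [List.filter_eq_self]
    intro a ha
    simp only [Bool.not_eq_eq_eq_not, Bool.not_true, beq_eq_false_iff_ne, ne_eq]
    intro hk; exact hpre (hk ▸ List.mem_map_of_mem ha)
  have hrest' : List.filter (fun q => !q.1 == k0) rest = rest := by
    rw [List.filter_eq_self]
    intro a ha
    simp only [Bool.not_eq_eq_eq_not, Bool.not_true, beq_eq_false_iff_ne, ne_eq]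
    intro hk; exact hrest (hk ▸ List.mem_map_of_mem ha)
  simp [hpre', hrest']

-- A's inner loop: one pass over a snapshot of the keys, popping the matches
theorem pvInnerA (p : String) (rp : Bool) :
    ∀ (l pre : List (String × Int)) (tmp : PySem.Dict String Int),
    ((pre ++ l).map Prod.fst).Nodup →
    (tmp.keys ++ (l.filter (fun kv => PySem.Str.startswith kv.1 p)).map (fun kv => pvNewKey rp p kv.1)).Nodup →
    (l.map Prod.fst).foldl
      (fun (tr : PySem.Dict String Int × PySem.Dict String Int) k =>
        if PySem.Str.startswith k p then
          match tr.2.pop? k with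
          | some vr => (tr.1.insert (pvNewKey rp p k) vr.1, vr.2)
          | none => tr
        else tr)
      (tmp, PySem.Dict.mk (pre ++ l))
    = (PySem.Dict.mk (tmp.items ++ (l.filter (fun kv => PySem.Str.startswith kv.1 p)).map (fun kv => (pvNewKey rp p kv.1, kv.2))),
       PySem.Dict.mk (pre ++ l.filter (fun kv => !PySem.Str.startswith kv.1 p))) := by
  intro l
  induction l with
  | nil => intro pre tmp _ _; simp
  | cons kv rest ih =>
    intro pre tmp hnd htmp
    obtain ⟨k0, v0⟩ := kv
    rw [List.map_cons, List.foldl_cons]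
    have hk0pre : k0 ∉ pre.map Prod.fst := by
      have := hnd
      rw [List.map_append, List.nodup_append] at this
      intro hmem
      exact this.2.2 k0 hmem k0 (by simp) rfl
    have hk0rest : k0 ∉ rest.map Prod.fst := by
      have := hnd
      rw [List.map_append] at this
      have h2 := this.of_append_right
      simp only [List.map_cons, List.nodup_cons] at h2
      exact h2.1
    by_cases hs : PySem.Str.startswith k0 p = true
    case pos =>
      have hsC : PySem.Chars.startswith k0.toList p.toList = true := by
        rw [← PySem.Str.startswith_eq]; exact hs
      have hget : (PySem.Dict.mk (pre ++ (k0, v0) :: rest) : PySem.Dict String Int).get? k0 = some v0 := by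
        apply PySem.Dict.get?_of_mem_items _ (by simp)
        simpa [PySem.Dict.keys, Function.comp] using hnd
      have hstep : (if PySem.Str.startswith k0 p then
            match (PySem.Dict.mk (pre ++ (k0, v0) :: rest) : PySem.Dict String Int).pop? k0 with
            | some vr => (tmp.insert (pvNewKey rp p k0) vr.1, vr.2)
            | none => (tmp, PySem.Dict.mk (pre ++ (k0, v0) :: rest))
          else (tmp, PySem.Dict.mk (pre ++ (k0, v0) :: rest)))
          = (tmp.insert (pvNewKey rp p k0) v0, PySem.Dict.mk (pre ++ rest)) := by
        rw [if_pos hs]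
        simp only [PySem.Dict.pop?, hget, Option.map_some]
        rw [pvErase_mk_middle pre rest k0 v0 hk0pre hk0rest]
      rw [List.filter_cons_of_pos (by simp [hsC]), List.filter_cons_of_neg (by simp [hsC])]
      have htmp' : ((tmp.insert (pvNewKey rp p k0) v0).keys
          ++ (rest.filter (fun kv => PySem.Str.startswith kv.1 p)).map (fun kv => pvNewKey rp p kv.1)).Nodup := by
        rw [List.filter_cons_of_pos (by simp [hsC]), List.map_cons] at htmp
        have hnc : tmp.contains (pvNewKey rp p k0) = false := by
          rw [← Bool.not_eq_true, PySem.Dict.contains_iff_mem_keys]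
          rw [List.nodup_append] at htmp
          exact fun hmem => htmp.2.2 _ hmem _ (by simp) rfl
        rw [PySem.Dict.keys_insert_of_not_contains _ _ hnc, List.append_assoc, List.singleton_append]
        exact htmp
      have hnd' : ((pre ++ rest).map Prod.fst).Nodup := by
        refine List.Nodup.sublist ?_ hnd
        exact ((List.sublist_cons_self (k0, v0) rest).append_left pre).map Prod.fst
      have := ih (pre := pre) (tmp := tmp.insert (pvNewKey rp p k0) v0) hnd' htmp'
      rw [hstep, this, PySem.Dict.items_insert_of_not_contains]
      · rw [List.map_cons, List.append_assoc, List.singleton_append]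
      · rw [List.filter_cons_of_pos (by simp [hsC]), List.map_cons, List.nodup_append] at htmp
        rw [← Bool.not_eq_true, PySem.Dict.contains_iff_mem_keys]
        exact fun hmem => htmp.2.2 _ hmem _ (by simp) rfl
    case neg =>
      have hs' : PySem.Str.startswith k0 p = false := by simpa using hs
      have hsC : PySem.Chars.startswith k0.toList p.toList = false := by
        rw [← PySem.Str.startswith_eq]; exact hs' 
      rw [if_neg (by simp [hsC])]
      rw [List.filter_cons_of_neg (by simp [hsC]), List.filter_cons_of_pos (by simp [hsC])]
      have hpre' : pre ++ (k0, v0) :: rest = (pre ++ [(k0, v0)]) ++ rest := by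
        rw [List.append_assoc, List.singleton_append]
      have hnd2 : (((pre ++ [(k0, v0)]) ++ rest).map Prod.fst).Nodup := by rw [← hpre']; exact hnd
      have htmp2 : (tmp.keys ++ (rest.filter (fun kv => PySem.Str.startswith kv.1 p)).map (fun kv => pvNewKey rp p kv.1)).Nodup := by
        rw [List.filter_cons_of_neg (by simp [hsC])] at htmp
        exact htmp
      have := ih (pre := pre ++ [(k0, v0)]) (tmp := tmp) hnd2 htmp2
      rw [hpre', this, List.append_assoc, List.singleton_append]


-- named forms of the two outer loop steps (definitionally equal to the ports' lambdas)
def pvStepA (rp : Bool) (st : List (PySem.Dict String Int) × PySem.Dict String Int) (p : String) :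
    List (PySem.Dict String Int) × PySem.Dict String Int :=
  let inner := st.2.keys.foldl (fun (tr : PySem.Dict String Int × PySem.Dict String Int) k =>
      if PySem.Str.startswith k p then
        match tr.2.pop? k with
        | some vr => (tr.1.insert (pvNewKey rp p k) vr.1, vr.2)
        | none => tr
      else tr)
    (PySem.Dict.empty, st.2)
  (st.1 ++ [inner.1], inner.2)

def pvStepB (ps : List String) (rp : Bool) (st : List (PySem.Dict String Int) × PySem.Dict String Int)
    (kv : String × Int) : List (PySem.Dict String Int) × PySem.Dict String Int :=
  match pvFindPrefix ps kv.1 with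
  | some ip => (st.1.modify ip.1 (fun d => d.insert (pvNewKey rp ip.2 kv.1) kv.2), st.2)
  | none => (st.1, st.2.insert kv.1 kv.2)

theorem pvA_eq (d : List (String × Int)) (ps : List String) (rp : Bool) :
    split_dict_on_prefixes d ps rp
      = ((ps.foldl (pvStepA rp) ([], PySem.Dict.ofList d)).1
          ++ [(ps.foldl (pvStepA rp) ([], PySem.Dict.ofList d)).2]).map PySem.Dict.items := rfl

theorem pvB_eq (d : List (String × Int)) (ps : List String) (rp : Bool) :
    split_dict_on_prefixes_alt d ps rp
      = ((d.foldl (pvStepB ps rp) (ps.map (fun _ => PySem.Dict.empty), PySem.Dict.empty)).1.map PySem.Dict.items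
          ++ [(d.foldl (pvStepB ps rp) (ps.map (fun _ => PySem.Dict.empty), PySem.Dict.empty)).2.items]) := rfl

theorem pvOfList_eq_mk (l : List (String × Int)) (h : (l.map Prod.fst).Nodup) :
    PySem.Dict.ofList l = PySem.Dict.mk l := by
  apply PySem.Dict.ext
  show (List.foldl (fun acc p => acc.insert p.1 p.2) PySem.Dict.empty l).items = l
  rw [PySem.Dict.items_foldl_insert_fresh l (fun p => p.1) (fun p => p.2) PySem.Dict.empty
    (fun a _ => by simp) (by exact h)]
  simp [PySem.Dict.empty]

theorem pvStepA_eval (rp : Bool) (p : String) (l : List (String × Int))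
    (hnd : (l.map Prod.fst).Nodup) (acc : List (PySem.Dict String Int)) :
    pvStepA rp (acc, PySem.Dict.mk l) p
      = (acc ++ [PySem.Dict.mk ((l.filter (fun kv => PySem.Str.startswith kv.1 p)).map (fun kv => (pvNewKey rp p kv.1, kv.2)))],
         PySem.Dict.mk (l.filter (fun kv => !PySem.Str.startswith kv.1 p))) := by
  have hkeys : ((acc, PySem.Dict.mk l).2 : PySem.Dict String Int).keys = l.map Prod.fst := rfl
  have hinner := pvInnerA p rp l [] PySem.Dict.empty (by simpa using hnd)
    (by simpa using pvRn_nodup rp p l hnd)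
  simp only [List.nil_append] at hinner
  have he : (PySem.Dict.empty : PySem.Dict String Int).items = [] := rfl
  simp only [pvStepA, hkeys, hinner, he, List.nil_append]

theorem pvAcore (rp : Bool) :
    ∀ (ps : List String) (l : List (String × Int)) (acc : List (PySem.Dict String Int)),
    (l.map Prod.fst).Nodup →
    ((ps.foldl (pvStepA rp) (acc, PySem.Dict.mk l)).1
        ++ [(ps.foldl (pvStepA rp) (acc, PySem.Dict.mk l)).2]).map PySem.Dict.items
      = acc.map PySem.Dict.items ++ pvRef rp l ps := by
  intro ps
  induction ps with
  | nil => intro l acc _; simp [pvRef]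
  | cons p ps ih =>
    intro l acc hnd
    rw [List.foldl_cons, pvStepA_eval rp p l hnd acc]
    have hnd' : ((l.filter (fun kv => !PySem.Str.startswith kv.1 p)).map Prod.fst).Nodup :=
      (List.Sublist.map _ List.filter_sublist).nodup hnd
    rw [ih _ _ hnd']
    simp [pvRef]

theorem pvBnil (rp : Bool) :
    ∀ (l : List (String × Int)) (o : PySem.Dict String Int),
    l.foldl (pvStepB [] rp) (([] : List (PySem.Dict String Int)), o)
      = ([], l.foldl (fun (d : PySem.Dict String Int) kv => d.insert kv.1 kv.2) o) := by
  intro l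
  induction l with
  | nil => intro o; rfl
  | cons kv rest ih =>
    intro o
    rw [List.foldl_cons, List.foldl_cons]
    exact ih (o.insert kv.1 kv.2)

theorem pvBsplit (rp : Bool) (p : String) (ps : List String) :
    ∀ (l : List (String × Int)) (b0 : PySem.Dict String Int) (bs : List (PySem.Dict String Int))
      (o : PySem.Dict String Int),
    l.foldl (pvStepB (p :: ps) rp) (b0 :: bs, o)
      = ((l.filter (fun kv => PySem.Str.startswith kv.1 p)).foldl
            (fun (d : PySem.Dict String Int) kv => d.insert (pvNewKey rp p kv.1) kv.2) b0
          :: ((l.filter (fun kv => !PySem.Str.startswith kv.1 p)).foldl (pvStepB ps rp) (bs, o)).1,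
         ((l.filter (fun kv => !PySem.Str.startswith kv.1 p)).foldl (pvStepB ps rp) (bs, o)).2) := by
  intro l
  induction l with
  | nil => intro b0 bs o; rfl
  | cons kv rest ih =>
    intro b0 bs o
    obtain ⟨k0, v0⟩ := kv
    by_cases hs : PySem.Str.startswith k0 p = true
    · have hsC : PySem.Chars.startswith k0.toList p.toList = true := by
        rw [← PySem.Str.startswith_eq]; exact hs
      have hstep : pvStepB (p :: ps) rp (b0 :: bs, o) (k0, v0)
          = (b0.insert (pvNewKey rp p k0) v0 :: bs, o) := by
        simp [pvStepB, pvFindPrefix, hsC, List.modify]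
      rw [List.foldl_cons, hstep,
        List.filter_cons_of_pos (by simp [hsC]), List.filter_cons_of_neg (by simp [hsC]),
        List.foldl_cons]
      exact ih (b0.insert (pvNewKey rp p k0) v0) bs o
    · have hs' : PySem.Str.startswith k0 p = false := by simpa using hs
      have hsC : PySem.Chars.startswith k0.toList p.toList = false := by
        rw [← PySem.Str.startswith_eq]; exact hs'
      have hstep : pvStepB (p :: ps) rp (b0 :: bs, o) (k0, v0)
          = (b0 :: (pvStepB ps rp (bs, o) (k0, v0)).1, (pvStepB ps rp (bs, o) (k0, v0)).2) := by
        cases hfp : pvFindPrefix ps k0 with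
        | none => simp [pvStepB, pvFindPrefix, hsC, hfp]
        | some ip => simp [pvStepB, pvFindPrefix, hsC, hfp, List.modify]
      rw [List.foldl_cons, hstep,
        List.filter_cons_of_neg (by simp [hsC]), List.filter_cons_of_pos (by simp [hsC]),
        List.foldl_cons]
      exact ih b0 (pvStepB ps rp (bs, o) (k0, v0)).1 (pvStepB ps rp (bs, o) (k0, v0)).2

set_option maxHeartbeats 1000000 in
theorem pvBcore (rp : Bool) :
    ∀ (ps : List String) (l : List (String × Int)), (l.map Prod.fst).Nodup →
    ((l.foldl (pvStepB ps rp) (ps.map (fun _ => PySem.Dict.empty), PySem.Dict.empty)).1.map PySem.Dict.items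
        ++ [(l.foldl (pvStepB ps rp) (ps.map (fun _ => PySem.Dict.empty), PySem.Dict.empty)).2.items])
      = pvRef rp l ps := by
  intro ps
  induction ps with
  | nil =>
    intro l hnd
    simp only [List.map_nil]
    rw [pvBnil]
    have : (List.foldl (fun (d : PySem.Dict String Int) kv => d.insert kv.1 kv.2) PySem.Dict.empty l).items = l := by
      rw [PySem.Dict.items_foldl_insert_fresh l (fun p => p.1) (fun p => p.2) PySem.Dict.empty
        (fun a _ => by simp) (by exact hnd)]
      simp [PySem.Dict.empty]
    simp [pvRef, this]
  | cons p ps ih =>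
    intro l hnd
    have hnd' : ((l.filter (fun kv => !PySem.Str.startswith kv.1 p)).map Prod.fst).Nodup :=
      (List.Sublist.map _ List.filter_sublist).nodup hnd
    have hb0 : (List.foldl (fun (d : PySem.Dict String Int) kv => d.insert (pvNewKey rp p kv.1) kv.2)
        PySem.Dict.empty (l.filter (fun kv => PySem.Str.startswith kv.1 p))).items
        = (l.filter (fun kv => PySem.Str.startswith kv.1 p)).map (fun kv => (pvNewKey rp p kv.1, kv.2)) := by
      have hfresh : ∀ a ∈ l.filter (fun kv => PySem.Str.startswith kv.1 p),
          (PySem.Dict.empty : PySem.Dict String Int).contains (pvNewKey rp p a.1) = false := by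
        intro a _; simp
      have h := PySem.Dict.items_foldl_insert_fresh
          (l.filter (fun kv => PySem.Str.startswith kv.1 p))
          (fun kv => pvNewKey rp p kv.1) (fun kv => kv.2) PySem.Dict.empty
          hfresh (pvRn_nodup rp p l hnd)
      simpa [PySem.Dict.empty] using h
    rw [List.map_cons, pvBsplit]
    simp only [List.map_cons, List.cons_append]
    rw [hb0, ih _ hnd']
    simp [pvRef]

-- ===== VERDICT (by name: the statement is the Claim_ definition above) =====
set_option maxHeartbeats 1000000 in
theorem split_dict_on_prefixes_spec : Claim_equal_split_dict_on_prefixes := by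
  intro d ps rp _ hpre
  unfold Spec_split_dict_on_prefixes
  unfold Pre_split_dict_on_prefixes at hpre
  rw [pvA_eq, pvB_eq, pvOfList_eq_mk d hpre, pvAcore rp ps d [] hpre, pvBcore rp ps d hpre]
  simp
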